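-- pv_equiv track=rewrite | github.com/Honkl/advent-of-code | 2023/12/12p2.py | is_still_valid
-- ===== SOURCE A (Python) =====
-- from typing import List, Tuple
--
-- def is_still_valid(symbols: List[str], counts: List[int]) -> bool:
--     """
--     Helper function that evaluates whether the `symbols` sequence can still match the `counts`. Returns False
--     if we know at this point that it won't matter, what we will for remaining '?' at this point.
--
--     We will count #s until first '?' and we will match it to first `counts` value.
--     """
--     if len(counts) == 0:
--         return True
--
--     desired_count = counts[0]
--     index = 0
--     current_count = 0
--     for i, ch in enumerate(symbols):
--         if ch == ".":
--             if current_count == 0: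
--                 # Nothing found yet
--                 continue
--
--             if current_count != desired_count:
--                 # We have more # than we wanted, so it's already invalid
--                 return False
--
--             current_count = 0
--             index += 1
--             if index >= len(counts):
--                 desired_count = -1
--             else:
--                 desired_count = counts[index]
--
--         if ch == "#":
--             current_count += 1
--
--         if ch == "?":
--             # Evaluate only till first question mark
--             return True
--
--     return True
-- ===== SOURCE B (Python) =====
-- from typing import List
--
-- def is_still_valid(symbols: List[str], counts: List[int]) -> bool:
--     if len(counts) == 0:
--         return True
--     # Pass 1: collect lengths of completed '#'-runs up to (not including) the
--     # first '?'; the final in-progress run is never appended.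
--     groups = []
--     run = 0
--     for ch in symbols:
--         if ch == "?":
--             break
--         if ch == ".":
--             if run > 0:
--                 groups.append(run)
--             run = 0
--         elif ch == "#":
--             run += 1
--     # Pass 2: every completed group must match the corresponding count.
--     for i, g in enumerate(groups):
--         if i >= len(counts) or g != counts[i]:
--             return False
--     return True
-- ===== Notes on version B (the rewrite author's own statement) =====
-- stated objective: alternative
-- what changed: B splits the work into two passes -- first collect the lengths of all completed '#'-runs before the first '?', then compare that list against counts index by index -- instead of A's single interleaved loop threading desired_count/index/current_count with a -1 sentinel for overflow.
import Mathlib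
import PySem

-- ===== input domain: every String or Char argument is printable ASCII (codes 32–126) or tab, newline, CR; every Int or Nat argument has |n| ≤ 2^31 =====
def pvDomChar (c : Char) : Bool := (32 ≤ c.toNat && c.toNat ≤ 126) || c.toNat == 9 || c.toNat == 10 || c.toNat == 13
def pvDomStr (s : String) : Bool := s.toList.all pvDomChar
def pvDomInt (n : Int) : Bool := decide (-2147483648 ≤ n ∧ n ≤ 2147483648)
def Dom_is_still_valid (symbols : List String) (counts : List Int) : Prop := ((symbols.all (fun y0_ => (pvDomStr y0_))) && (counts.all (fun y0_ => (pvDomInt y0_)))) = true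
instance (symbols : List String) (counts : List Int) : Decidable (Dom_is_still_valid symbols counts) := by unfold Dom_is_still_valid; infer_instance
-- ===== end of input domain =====

-- B replaces A's single interleaved loop (state desired/index/current, -1 sentinel) by two
-- passes: collect completed '#'-run lengths before the first '?', then compare with counts.

-- ===== PORT A =====
-- A's for-loop over symbols with state (desired_count, index, current_count);
-- early returns become `false`/`true` results.
def isvLoopA (counts : List Int) : List String → Int → Int → Int → Bool
  | [], _, _, _ => true
  | ch :: rest, desired, index, current =>
    if ch == "." then
      if current == 0 then
        isvLoopA counts rest desired index current
      else if current != desired then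
        false
      else
        let index' := index + 1
        let desired' : Int :=
          if index' ≥ (counts.length : Int) then -1
          else (PySem.List.pyGet? counts index').getD 0
        isvLoopA counts rest desired' index' 0
    else if ch == "#" then
      isvLoopA counts rest desired index (current + 1)
    else if ch == "?" then
      true
    else
      isvLoopA counts rest desired index current

def is_still_valid (symbols : List String) (counts : List Int) : Bool :=
  if counts.length == 0 then true
  else isvLoopA counts symbols ((PySem.List.pyGet? counts 0).getD 0) 0 0

-- ===== PORT B =====
-- Pass 1: lengths of completed '#'-runs before the first '?' (trailing run never appended).
def isvGroups : List String → Int → List Int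
  | [], _ => []
  | ch :: rest, run =>
    if ch == "?" then []
    else if ch == "." then
      (if run > 0 then [run] else []) ++ isvGroups rest 0
    else if ch == "#" then
      isvGroups rest (run + 1)
    else
      isvGroups rest run

-- Pass 2: compare groups with counts index by index.
def isvCheck (counts : List Int) : List Int → Int → Bool
  | [], _ => true
  | g :: rest, i =>
    if i ≥ (counts.length : Int) then false
    else if g != (PySem.List.pyGet? counts i).getD 0 then false
    else isvCheck counts rest (i + 1)

def is_still_valid_alt (symbols : List String) (counts : List Int) : Bool :=
  if counts.length == 0 then true
  else isvCheck counts (isvGroups symbols 0) 0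

-- ===== PRECONDITION & SPEC =====
def Spec_is_still_valid (symbols : List String) (counts : List Int) (out : Bool) : Prop := out = is_still_valid_alt symbols counts
instance (symbols : List String) (counts : List Int) (out : Bool) : Decidable (Spec_is_still_valid symbols counts out) := by unfold Spec_is_still_valid; infer_instance

-- ===== CLAIM (what is proved, stated in full; the proofs are below) =====
def Claim_equal_is_still_valid : Prop := ∀ (symbols : List String) (counts : List Int), Dom_is_still_valid symbols counts → Spec_is_still_valid symbols counts (is_still_valid symbols counts)

-- ===== LEMMAS AND PROOFS =====

-- the desired_count A keeps for position idx
def isvDes (counts : List Int) (idx : Int) : Int :=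
  if idx ≥ (counts.length : Int) then -1 else (PySem.List.pyGet? counts idx).getD 0

lemma isv_loop_eq (counts : List Int) (symbols : List String) :
    ∀ (idx run : Int), 0 ≤ run →
      isvLoopA counts symbols (isvDes counts idx) idx run
        = isvCheck counts (isvGroups symbols run) idx := by
  induction symbols with
  | nil => intro idx run _; simp [isvLoopA, isvGroups, isvCheck]
  | cons ch rest ih =>
    intro idx run hrun
    by_cases hq : ch = "?"
    · subst hq
      simp [isvLoopA, isvGroups, isvCheck]
    · by_cases hd : ch = "."
      · subst hd
        by_cases hz : run = 0
        · subst hz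
          simpa [isvLoopA, isvGroups] using ih idx 0 le_rfl
        · have hpos : 0 < run := lt_of_le_of_ne hrun (Ne.symm hz)
          by_cases hov : idx ≥ (counts.length : Int)
          · -- overflow: A compares run with sentinel -1, B fails the bounds check
            have : run ≠ isvDes counts idx := by
              simp [isvDes, hov]; omega
            simp [isvLoopA, isvGroups, isvCheck, hz, hpos, hov, this]
          · have hdes : isvDes counts idx = (PySem.List.pyGet? counts idx).getD 0 := by
              simp [isvDes, hov]
            by_cases heq : run = (PySem.List.pyGet? counts idx).getD 0
            · have hl :
                  isvLoopA counts ("." :: rest) (isvDes counts idx) idx run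
                    = isvLoopA counts rest (isvDes counts (idx + 1)) (idx + 1) 0 := by
                simp only [isvLoopA, isvDes]
                rw [← heq]
                simp [hz, hov]
              have hr :
                  isvCheck counts (isvGroups ("." :: rest) run) idx
                    = isvCheck counts (isvGroups rest 0) (idx + 1) := by
                simp [isvGroups, isvCheck, hpos, hov, ← heq]
              rw [hl, hr]; exact ih (idx + 1) 0 le_rfl
            · simp [isvLoopA, isvGroups, isvCheck, hz, hpos, hov, hdes, heq]
      · by_cases hh : ch = "#"
        · subst hh
          simpa [isvLoopA, isvGroups] using ih idx (run + 1) (by omega)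
        · simpa [isvLoopA, isvGroups, hq, hd, hh] using ih idx run hrun

-- ===== VERDICT (by name: the statement is the Claim_ definition above) =====
theorem is_still_valid_spec : Claim_equal_is_still_valid := by
  intro symbols counts _
  unfold Spec_is_still_valid is_still_valid is_still_valid_alt
  by_cases h : counts.length = 0
  · simp [h]
  · have h0 : (0 : Int) < (counts.length : Int) := by
      exact_mod_cast Nat.pos_of_ne_zero h
    have hne : counts ≠ [] := fun he => h (by simp [he])
    have := isv_loop_eq counts symbols 0 0 le_rfl
    simp [isvDes, hne] at this
    simp [h, this]
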